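-- pv_equiv track=rewrite | github.com/jbsam2/algo_problem | programmers/단어퍼즐.py | solution
-- ===== SOURCE A (Python) =====
-- def solution(strs, t):
--     n=len(t)
--     dp=[0]+[-1]*n
--     for i in range(1,n+1):
--         for j in range(1,6):
--             if i-j>=0 and t[i-j:i] in strs and dp[i-j]!=-1:
--                 if dp[i]==-1:dp[i]=dp[i-j]+1
--                 else:dp[i]=min(dp[i],dp[i-j]+1)
--     return dp[-1]
-- ===== SOURCE B (Python) =====
-- def solution(strs, t):
--     # BFS over positions 0..n: edge i -> i+j (j=1..5) when t[i:i+j] is a word;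
--     # level of first reaching n is the minimal word count, -1 if unreachable.
--     n = len(t)
--     frontier = [0]
--     visited = {0}
--     count = 0
--     while frontier:
--         if n in frontier:
--             return count
--         nxt = []
--         for i in frontier:
--             for j in range(1, 6):
--                 k = i + j
--                 if k <= n and k not in visited and t[i:k] in strs:
--                     visited.add(k)
--                     nxt.append(k)
--         frontier = nxt
--         count += 1
--     return -1
-- ===== Notes on version B (the rewrite author's own statement) =====
-- stated objective: alternative
-- what changed: Replaces A's bottom-up DP table over string positions by a breadth-first search on the position graph (edge i->i+j when t[i:i+j] is a word): a frontier list and a visited set are expanded level by level and the level at which position n is first dequeued is returned (-1 if the frontier empties), so no dp array, no sentinel arithmetic and no min-merging exist in B.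
import Mathlib
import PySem

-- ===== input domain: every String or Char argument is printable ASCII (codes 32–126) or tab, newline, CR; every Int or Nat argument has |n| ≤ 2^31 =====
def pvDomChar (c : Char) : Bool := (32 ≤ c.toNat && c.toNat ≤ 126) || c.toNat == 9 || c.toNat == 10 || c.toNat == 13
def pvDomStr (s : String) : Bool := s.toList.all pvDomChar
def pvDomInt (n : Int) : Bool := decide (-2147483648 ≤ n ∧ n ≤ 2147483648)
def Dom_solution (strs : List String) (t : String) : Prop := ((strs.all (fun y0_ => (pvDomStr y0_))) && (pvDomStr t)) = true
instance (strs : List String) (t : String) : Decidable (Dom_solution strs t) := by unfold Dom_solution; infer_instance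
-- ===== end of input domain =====

-- B replaces A's bottom-up DP table (-1 sentinel, min-merging over dp[i-j]) by a
-- breadth-first search on positions 0..n with a frontier list and a visited set,
-- returning the level at which position n first appears; objective: alternative algorithm.

-- ===== PORT A =====
def innerA (strs : List String) (t : String) (i : Int) (dp : List Int) (j : Int) : List Int :=
  if decide (0 ≤ i - j) && strs.contains (PySem.Str.slice t (some (i - j)) (some i))
       && (PySem.List.pyGetD dp (i - j) 0 != -1) then
    if PySem.List.pyGetD dp i 0 == -1 then
      PySem.List.pySetD dp i (PySem.List.pyGetD dp (i - j) 0 + 1)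
    else
      PySem.List.pySetD dp i (min (PySem.List.pyGetD dp i 0) (PySem.List.pyGetD dp (i - j) 0 + 1))
  else dp

def solution (strs : List String) (t : String) : Int :=
  let n : Int := PySem.Str.len t
  let dp0 : List Int := 0 :: List.replicate n.toNat (-1)
  let dp1 := (PySem.List.pyRange 1 (n + 1) 1).foldl
      (fun dp i => (PySem.List.pyRange 1 6 1).foldl (innerA strs t i) dp) dp0
  PySem.List.pyGetD dp1 (-1) 0

-- ===== PORT B =====
-- one inner-loop body: try edge i -> i+j
def stepB (strs : List String) (t : String) (n i : Int)
    (st : PySem.Set Int × List Int) (j : Int) : PySem.Set Int × List Int :=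
  let k := i + j
  if decide (k ≤ n) && !(PySem.Set.contains st.1 k)
       && strs.contains (PySem.Str.slice t (some i) (some k)) then
    (PySem.Set.add st.1 k, st.2 ++ [k])
  else st

-- expand one frontier node i over j = 1..5
def expandB (strs : List String) (t : String) (n : Int)
    (st : PySem.Set Int × List Int) (i : Int) : PySem.Set Int × List Int :=
  (PySem.List.pyRange 1 6 1).foldl (stepB strs t n i) st

-- the while-loop; fuel only makes the recursion structural (it is never exhausted)
def bfsB (strs : List String) (t : String) (n : Int) :
    Nat → List Int → PySem.Set Int → Int → Int
  | 0, _, _, _ => -1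
  | fuel + 1, frontier, visited, count =>
    if frontier = [] then -1
    else if frontier.contains n then count
    else
      let st := frontier.foldl (expandB strs t n) (visited, [])
      bfsB strs t n fuel st.2 st.1 (count + 1)

def solution_alt (strs : List String) (t : String) : Int :=
  let n : Int := PySem.Str.len t
  bfsB strs t n (n.toNat + 2) [0] (PySem.Set.ofList [0]) 0

-- ===== PRECONDITION & SPEC =====
def Spec_solution (strs : List String) (t : String) (out : Int) : Prop := out = solution_alt strs t
instance (strs : List String) (t : String) (out : Int) : Decidable (Spec_solution strs t out) := by unfold Spec_solution; infer_instance

-- ===== CLAIM (what is proved, stated in full; the proofs are below) =====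
def Claim_equal_solution : Prop := ∀ (strs : List String) (t : String), Dom_solution strs t → Spec_solution strs t (solution strs t)

-- ===== LEMMAS AND PROOFS =====

/-- min on `Option Nat` with `none` = "unreachable" as identity. -/
def ominO : Option Nat → Option Nat → Option Nat
  | none, b => b
  | some x, none => some x
  | some x, some y => some (min x y)

/-- edge test: the slice of `t` from `a` to `b` is one of the words. -/
def okn (strs : List String) (t : String) (a b : Nat) : Bool :=
  strs.contains (PySem.Str.slice t (some (a : Int)) (some (b : Int)))

/-- minimal number of words tiling the length-`i` prefix of `t` (`none` = impossible). -/
def M (strs : List String) (t : String) : Nat → Option Nat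
  | 0 => some 0
  | i + 1 =>
    ominO (ominO (ominO (ominO (ominO none
      (if 1 ≤ i + 1 ∧ okn strs t (i + 1 - 1) (i + 1) = true then (M strs t (i + 1 - 1)).map (· + 1) else none))
      (if 2 ≤ i + 1 ∧ okn strs t (i + 1 - 2) (i + 1) = true then (M strs t (i + 1 - 2)).map (· + 1) else none))
      (if 3 ≤ i + 1 ∧ okn strs t (i + 1 - 3) (i + 1) = true then (M strs t (i + 1 - 3)).map (· + 1) else none))
      (if 4 ≤ i + 1 ∧ okn strs t (i + 1 - 4) (i + 1) = true then (M strs t (i + 1 - 4)).map (· + 1) else none))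
      (if 5 ≤ i + 1 ∧ okn strs t (i + 1 - 5) (i + 1) = true then (M strs t (i + 1 - 5)).map (· + 1) else none)
  termination_by i => i
  decreasing_by all_goals omega

def candA (strs : List String) (t : String) (i j : Nat) : Option Nat :=
  if j ≤ i ∧ okn strs t (i - j) i = true then (M strs t (i - j)).map (· + 1) else none

/-- A's encoding of an optional count (−1 = unreachable). -/
def enc : Option Nat → Int
  | none => -1
  | some k => (k : Int)

lemma M_succ (strs : List String) (t : String) (i : Nat) :
    M strs t (i + 1) =
    ominO (ominO (ominO (ominO (ominO none (candA strs t (i + 1) 1)) (candA strs t (i + 1) 2))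
      (candA strs t (i + 1) 3)) (candA strs t (i + 1) 4)) (candA strs t (i + 1) 5) := by
  rw [M]; simp only [candA]

lemma ominO_none_right (a : Option Nat) : ominO a none = a := by cases a <;> rfl

lemma ominO_le {a b : Option Nat} {c : Nat}
    (ha : ∀ x, a = some x → x ≤ c) (hb : ∀ x, b = some x → x ≤ c) :
    ∀ x, ominO a b = some x → x ≤ c := by
  cases a with
  | none => exact fun x hx => hb x hx
  | some u =>
      cases b with
      | none => exact fun x hx => ha x hx
      | some w =>
          intro x hx
          simp only [ominO, Option.some.injEq] at hx
          have hu := ha u rfl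
          have := Nat.min_le_left u w
          omega

lemma candA_le (strs : List String) (t : String) (i j : Nat) (hj : 1 ≤ j)
    (IH : ∀ a, a < i → ∀ v, M strs t a = some v → v ≤ a) :
    ∀ x, candA strs t i j = some x → x ≤ i := by
  intro x hx
  unfold candA at hx
  split_ifs at hx with h
  · obtain ⟨h1, _⟩ := h
    cases hM : M strs t (i - j) with
    | none => rw [hM] at hx; simp at hx
    | some v =>
        rw [hM] at hx
        simp only [Option.map_some, Option.some.injEq] at hx
        have := IH (i - j) (by omega) v hM
        omega

lemma M_le (strs : List String) (t : String) : ∀ i v, M strs t i = some v → v ≤ i := by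
  intro i
  induction i using Nat.strong_induction_on with
  | _ i IH =>
    cases i with
    | zero => intro v hv; simp [M] at hv; omega
    | succ k =>
        intro v hv
        rw [M_succ] at hv
        exact ominO_le (ominO_le (ominO_le (ominO_le (ominO_le
          (fun x hx => by simp at hx)
          (candA_le strs t (k+1) 1 (by omega) IH))
          (candA_le strs t (k+1) 2 (by omega) IH))
          (candA_le strs t (k+1) 3 (by omega) IH))
          (candA_le strs t (k+1) 4 (by omega) IH))
          (candA_le strs t (k+1) 5 (by omega) IH) v hv

lemma enc_ne_neg_one {o : Option Nat} (m : Nat) (h : o = some m) : (enc o != -1) = true := by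
  subst h; simp [enc, bne_iff_ne]

lemma acc_of_beq_true {o : Option Nat} (h : (enc o == (-1 : Int)) = true) : o = none := by
  cases o with
  | none => rfl
  | some x => simp [enc] at h

lemma acc_of_beq_false {o : Option Nat} (h : (enc o == (-1 : Int)) = false) : ∃ x, o = some x := by
  cases o with
  | none => simp [enc] at h
  | some x => exact ⟨x, rfl⟩

lemma innerA_step (strs : List String) (t : String) (N i : Nat) (j : Int) (dp : List Int)
    (acc : Option Nat) (hj : 1 ≤ j) (hiN : i ≤ N)
    (hlen : dp.length = N + 1)
    (hlow : ∀ a : Nat, a < i → PySem.List.pyGetD dp (a : Int) 0 = enc (M strs t a))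
    (hacc : PySem.List.pyGetD dp (i : Int) 0 = enc acc) :
    (innerA strs t (i : Int) dp j).length = N + 1 ∧
    (∀ a : Nat, a ≠ i → PySem.List.pyGetD (innerA strs t (i : Int) dp j) (a : Int) 0 =
        PySem.List.pyGetD dp (a : Int) 0) ∧
    PySem.List.pyGetD (innerA strs t (i : Int) dp j) (i : Int) 0 =
      enc (ominO acc (candA strs t i j.toNat)) := by
  obtain ⟨jn, rfl⟩ : ∃ jn : Nat, j = (jn : Int) := ⟨j.toNat, (Int.toNat_of_nonneg (by omega)).symm⟩
  have hjn : 1 ≤ jn := by exact_mod_cast hj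
  have hiL : i < dp.length := by omega
  rw [show ((jn : Int)).toNat = jn from Int.toNat_natCast jn]
  unfold innerA
  split_ifs with hc1 hc2
  ·
    -- relaxation fires
    rw [Bool.and_eq_true, Bool.and_eq_true] at hc1
    obtain ⟨⟨h0, hok⟩, hne⟩ := hc1
    have hji : jn ≤ i := by
      have := of_decide_eq_true h0; omega
    have hsub : ((i : Int) - (jn : Int)) = ((i - jn : Nat) : Int) := by
      rw [Nat.cast_sub hji]
    rw [hsub] at hne ⊢
    have hread := hlow (i - jn) (by omega)
    obtain ⟨m', hM⟩ : ∃ m', M strs t (i - jn) = some m' := by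
      cases hM0 : M strs t (i - jn) with
      | none => rw [hread, hM0] at hne; simp [enc] at hne
      | some m' => exact ⟨m', rfl⟩
    have hokn : okn strs t (i - jn) i = true := by rw [hsub] at hok; exact hok
    have hcv : candA strs t i jn = some (m' + 1) := by
      unfold candA; rw [if_pos ⟨hji, hokn⟩, hM]; rfl
    have haccn : acc = none := acc_of_beq_true (by rw [← hacc]; exact hc2)
    refine ⟨by rw [PySem.List.length_pySetD]; exact hlen, ?_, ?_⟩
    · intro a ha
      rw [PySem.List.pyGetD_pySetD_natCast dp i a _ 0 hiL, if_neg ha]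
    · rw [PySem.List.pyGetD_pySetD_natCast dp i i _ 0 hiL, if_pos rfl, hread, hM, hcv, haccn]
      simp [enc, ominO]
  ·
    rw [Bool.and_eq_true, Bool.and_eq_true] at hc1
    obtain ⟨⟨h0, hok⟩, hne⟩ := hc1
    have hji : jn ≤ i := by
      have := of_decide_eq_true h0; omega
    have hsub : ((i : Int) - (jn : Int)) = ((i - jn : Nat) : Int) := by
      rw [Nat.cast_sub hji]
    rw [hsub] at hne ⊢
    have hread := hlow (i - jn) (by omega)
    obtain ⟨m', hM⟩ : ∃ m', M strs t (i - jn) = some m' := by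
      cases hM0 : M strs t (i - jn) with
      | none => rw [hread, hM0] at hne; simp [enc] at hne
      | some m' => exact ⟨m', rfl⟩
    have hokn : okn strs t (i - jn) i = true := by rw [hsub] at hok; exact hok
    have hcv : candA strs t i jn = some (m' + 1) := by
      unfold candA; rw [if_pos ⟨hji, hokn⟩, hM]; rfl
    obtain ⟨x, haccx⟩ := acc_of_beq_false (o := acc)
      (by rw [← hacc]; exact eq_false_of_ne_true hc2)
    refine ⟨by rw [PySem.List.length_pySetD]; exact hlen, ?_, ?_⟩
    · intro a ha
      rw [PySem.List.pyGetD_pySetD_natCast dp i a _ 0 hiL, if_neg ha]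
    · rw [PySem.List.pyGetD_pySetD_natCast dp i i _ 0 hiL, if_pos rfl, hread, hM, hcv, haccx, hacc, haccx]
      simp only [ominO, enc]
      push_cast
      omega
  ·
    -- no relaxation: the candidate is `none`
    refine ⟨hlen, fun a _ => rfl, ?_⟩
    rw [hacc]
    have hcn : candA strs t i jn = none := by
      by_cases hji : jn ≤ i
      · have hsub : ((i : Int) - (jn : Int)) = ((i - jn : Nat) : Int) := by
          rw [Nat.cast_sub hji]
        have hread := hlow (i - jn) (by omega)
        unfold candA
        by_cases hokn : okn strs t (i - jn) i = true
        · cases hM : M strs t (i - jn) with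
          | none => simp
          | some m' =>
              exfalso
              apply hc1
              rw [Bool.and_eq_true, Bool.and_eq_true, hsub]
              refine ⟨⟨by simp, hokn⟩, ?_⟩
              rw [hread, hM]
              exact enc_ne_neg_one m' rfl
        · rw [if_neg (by tauto)]
      · unfold candA
        rw [if_neg (by tauto)]
    rw [hcn, ominO_none_right]

lemma innerA_foldl (strs : List String) (t : String) (N i : Nat) (hiN : i ≤ N) :
    ∀ (js : List Int), (∀ j ∈ js, 1 ≤ j) →
    ∀ (dp : List Int) (acc : Option Nat),
      dp.length = N + 1 →
      (∀ a : Nat, a < i → PySem.List.pyGetD dp (a : Int) 0 = enc (M strs t a)) →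
      PySem.List.pyGetD dp (i : Int) 0 = enc acc →
      (js.foldl (innerA strs t (i : Int)) dp).length = N + 1 ∧
      (∀ a : Nat, a ≠ i → PySem.List.pyGetD (js.foldl (innerA strs t (i : Int)) dp) (a : Int) 0 =
          PySem.List.pyGetD dp (a : Int) 0) ∧
      PySem.List.pyGetD (js.foldl (innerA strs t (i : Int)) dp) (i : Int) 0 =
        enc (js.foldl (fun acc j => ominO acc (candA strs t i j.toNat)) acc) := by
  intro js
  induction js with
  | nil => intro _ dp acc hlen hlow hacc; exact ⟨hlen, fun a _ => rfl, by simpa using hacc⟩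
  | cons j js IH =>
      intro hjs dp acc hlen hlow hacc
      obtain ⟨s1, s2, s3⟩ := innerA_step strs t N i j dp acc (hjs j (by simp)) hiN hlen hlow hacc
      have hlow' : ∀ a : Nat, a < i →
          PySem.List.pyGetD (innerA strs t (i : Int) dp j) (a : Int) 0 = enc (M strs t a) := by
        intro a ha; rw [s2 a (by omega)]; exact hlow a ha
      obtain ⟨r1, r2, r3⟩ := IH (fun j' hj' => hjs j' (by simp [hj']))
        (innerA strs t (i : Int) dp j) (ominO acc (candA strs t i j.toNat)) s1 hlow' s3
      refine ⟨by simpa using r1, ?_, ?_⟩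
      · intro a ha
        simp only [List.foldl_cons]
        rw [r2 a ha, s2 a ha]
      · simp only [List.foldl_cons]
        exact r3

lemma outerA_foldl (strs : List String) (t : String) (N : Nat) : ∀ p : Nat, p ≤ N →
    ((PySem.List.pyRange 1 ((p : Int) + 1) 1).foldl
        (fun dp i => (PySem.List.pyRange 1 6 1).foldl (innerA strs t i) dp)
        (0 :: List.replicate N (-1))).length = N + 1 ∧
    (∀ a : Nat, a ≤ p → PySem.List.pyGetD
        ((PySem.List.pyRange 1 ((p : Int) + 1) 1).foldl
          (fun dp i => (PySem.List.pyRange 1 6 1).foldl (innerA strs t i) dp)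
          (0 :: List.replicate N (-1))) (a : Int) 0 = enc (M strs t a)) ∧
    (∀ a : Nat, p < a → a ≤ N → PySem.List.pyGetD
        ((PySem.List.pyRange 1 ((p : Int) + 1) 1).foldl
          (fun dp i => (PySem.List.pyRange 1 6 1).foldl (innerA strs t i) dp)
          (0 :: List.replicate N (-1))) (a : Int) 0 = -1) := by
  intro p
  induction p with
  | zero =>
      intro _
      rw [show ((0 : Nat) : Int) + 1 = 1 from by norm_num,
          PySem.List.pyRange_one_eq_nil (le_refl (1 : Int))]
      simp only [List.foldl_nil]
      refine ⟨by simp, ?_, ?_⟩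
      · intro a ha
        have : a = 0 := by omega
        subst this
        rw [show ((0 : Nat) : Int) = 0 from rfl, PySem.List.pyGetD_zero_cons]
        simp [M, enc]
      · intro a h1 h2
        obtain ⟨b, rfl⟩ : ∃ b, a = b + 1 := ⟨a - 1, by omega⟩
        rw [PySem.List.pyGetD_natCast, List.getD_cons_succ, List.getD_replicate _ (by omega)]
  | succ p IHp =>
      intro hp
      obtain ⟨L1, L2, L3⟩ := IHp (by omega)
      have hel : ((p : Int) + 1) = ((p + 1 : Nat) : Int) := by push_cast; ring
      rw [show (((p + 1 : Nat) : Int)) + 1 = (((p : Int) + 1) + 1) from by push_cast; ring,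
          PySem.List.pyRange_one_succ_right (by
            have : (0 : Int) ≤ (p : Int) := by positivity
            omega)]
      simp only [List.foldl_append, List.foldl_cons, List.foldl_nil]
      rw [show innerA strs t ((p : Int) + 1) = innerA strs t ((p + 1 : Nat) : Int) from by rw [hel]]
      have hjs : ∀ j ∈ PySem.List.pyRange 1 6 1, 1 ≤ j := by decide
      have hacc : PySem.List.pyGetD
          ((PySem.List.pyRange 1 ((p : Int) + 1) 1).foldl
            (fun dp i => (PySem.List.pyRange 1 6 1).foldl (innerA strs t i) dp)
            (0 :: List.replicate N (-1))) ((p + 1 : Nat) : Int) 0 = enc none :=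
        L3 (p + 1) (by omega) hp
      obtain ⟨r1, r2, r3⟩ := innerA_foldl strs t N (p + 1) hp
        (PySem.List.pyRange 1 6 1) hjs _ none L1
        (fun a ha => L2 a (by omega)) hacc
      refine ⟨r1, ?_, ?_⟩
      · intro a ha
        by_cases hae : a = p + 1
        · subst hae
          rw [r3]
          congr 1
          rw [show PySem.List.pyRange 1 6 1 = [1, 2, 3, 4, 5] from by decide]
          simp only [List.foldl_cons, List.foldl_nil]
          rw [M_succ]
          rfl
        · rw [r2 a hae]
          exact L2 a (by omega)
      · intro a h1 h2
        rw [r2 a (by omega)]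
        exact L3 a (by omega) h2

lemma solution_eq (strs : List String) (t : String) :
    solution strs t = enc (M strs t t.toList.length) := by
  simp only [solution, PySem.Str.len_eq, Int.toNat_natCast]
  obtain ⟨L1, L2, _⟩ := outerA_foldl strs t t.toList.length t.toList.length le_rfl
  have hne : ((PySem.List.pyRange 1 ((t.toList.length : Int) + 1) 1).foldl
      (fun dp i => (PySem.List.pyRange 1 6 1).foldl (innerA strs t i) dp)
      (0 :: List.replicate t.toList.length (-1))) ≠ [] := by
    intro h; rw [h] at L1; simp at L1
  rw [PySem.List.pyGetD_neg_one _ _ hne]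
  have := L2 t.toList.length le_rfl
  rw [PySem.List.pyGetD_natCast, List.getD_eq_getElem _ _ (by omega)] at this
  simp only [List.getLast_eq_getElem, L1, Nat.add_sub_cancel]
  exact this

-- ====================== B-side (BFS) lemmas ======================

/-- `o` is `some w` for some `w ≤ v`. -/
def LEopt (o : Option Nat) (v : Nat) : Prop := ∃ w, w ≤ v ∧ o = some w

lemma LEopt_ominO_left {a : Option Nat} (b : Option Nat) {v : Nat} (h : LEopt a v) :
    LEopt (ominO a b) v := by
  obtain ⟨w, hw, rfl⟩ := h
  cases b with
  | none => exact ⟨w, hw, rfl⟩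
  | some y => exact ⟨min w y, by omega, rfl⟩

lemma LEopt_ominO_right (a : Option Nat) {b : Option Nat} {v : Nat} (h : LEopt b v) :
    LEopt (ominO a b) v := by
  obtain ⟨w, hw, rfl⟩ := h
  cases a with
  | none => exact ⟨w, hw, rfl⟩
  | some x => exact ⟨min x w, by omega, rfl⟩

lemma ominO_eq_some {a b : Option Nat} {v : Nat} (h : ominO a b = some v) :
    a = some v ∨ b = some v := by
  cases a with
  | none => exact Or.inr h
  | some x =>
      cases b with
      | none => exact Or.inl h
      | some y =>
          simp only [ominO, Option.some.injEq] at h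
          by_cases hxy : x ≤ y
          · left; rw [← h, Nat.min_eq_left hxy]
          · right; rw [← h, Nat.min_eq_right (by omega)]

lemma candA_some {strs : List String} {t : String} {i j v : Nat}
    (h : candA strs t i j = some v) :
    j ≤ i ∧ okn strs t (i - j) i = true ∧ ∃ w, M strs t (i - j) = some w ∧ v = w + 1 := by
  unfold candA at h
  split_ifs at h with hc
  · cases hM : M strs t (i - j) with
    | none => rw [hM] at h; simp at h
    | some w =>
        rw [hM] at h
        simp only [Option.map_some, Option.some.injEq] at h
        exact ⟨hc.1, hc.2, w, rfl, h.symm⟩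

/-- every positive value of `M` comes from an in-word edge of length 1..5. -/
lemma M_extract {strs : List String} {t : String} {i v : Nat}
    (h : M strs t (i + 1) = some v) :
    ∃ j, 1 ≤ j ∧ j ≤ 5 ∧ j ≤ i + 1 ∧ okn strs t (i + 1 - j) (i + 1) = true ∧
      ∃ w, M strs t (i + 1 - j) = some w ∧ v = w + 1 := by
  rw [M_succ] at h
  rcases ominO_eq_some h with h4 | h5
  · rcases ominO_eq_some h4 with h3 | h4'
    · rcases ominO_eq_some h3 with h2 | h3'
      · rcases ominO_eq_some h2 with h1 | h2'
        · rcases ominO_eq_some h1 with h0 | h1'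
          · simp at h0
          · obtain ⟨hj, hok, w, hw, hv⟩ := candA_some h1'
            exact ⟨1, by omega, by omega, hj, hok, w, hw, hv⟩
        · obtain ⟨hj, hok, w, hw, hv⟩ := candA_some h2'
          exact ⟨2, by omega, by omega, hj, hok, w, hw, hv⟩
      · obtain ⟨hj, hok, w, hw, hv⟩ := candA_some h3'
        exact ⟨3, by omega, by omega, hj, hok, w, hw, hv⟩
    · obtain ⟨hj, hok, w, hw, hv⟩ := candA_some h4'
      exact ⟨4, by omega, by omega, hj, hok, w, hw, hv⟩
  · obtain ⟨hj, hok, w, hw, hv⟩ := candA_some h5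
    exact ⟨5, by omega, by omega, hj, hok, w, hw, hv⟩

lemma M_zero_iff (strs : List String) (t : String) (k : Nat) :
    M strs t k = some 0 ↔ k = 0 := by
  constructor
  · intro h
    cases k with
    | zero => rfl
    | succ i =>
        obtain ⟨j, _, _, _, _, w, _, hv⟩ := M_extract h
        omega
  · rintro rfl; simp [M]

/-- edge upper bound: a word edge from `p` bounds `M` at its endpoint by `c+1`. -/
lemma M_edge_le {strs : List String} {t : String} {p k c : Nat}
    (hM : M strs t p = some c) (h1 : p < k) (h5 : k ≤ p + 5)
    (hok : okn strs t p k = true) : LEopt (M strs t k) (c + 1) := by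
  obtain ⟨i, rfl⟩ : ∃ i, k = i + 1 := ⟨k - 1, by omega⟩
  have hcand : candA strs t (i + 1) (i + 1 - p) = some (c + 1) := by
    unfold candA
    rw [if_pos ⟨by omega, by rw [show i + 1 - (i + 1 - p) = p from by omega]; exact hok⟩,
        show i + 1 - (i + 1 - p) = p from by omega, hM]
    rfl
  have hle : LEopt (some (c + 1)) (c + 1) := ⟨c + 1, le_rfl, rfl⟩
  rw [M_succ]
  have hd : i + 1 - p = 1 ∨ i + 1 - p = 2 ∨ i + 1 - p = 3 ∨ i + 1 - p = 4 ∨ i + 1 - p = 5 := by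
    omega
  rcases hd with hd | hd | hd | hd | hd <;> rw [hd] at hcand
  · exact LEopt_ominO_left _ (LEopt_ominO_left _ (LEopt_ominO_left _ (LEopt_ominO_left _
      (LEopt_ominO_right _ (hcand ▸ hle)))))
  · exact LEopt_ominO_left _ (LEopt_ominO_left _ (LEopt_ominO_left _
      (LEopt_ominO_right _ (hcand ▸ hle))))
  · exact LEopt_ominO_left _ (LEopt_ominO_left _ (LEopt_ominO_right _ (hcand ▸ hle)))
  · exact LEopt_ominO_left _ (LEopt_ominO_right _ (hcand ▸ hle))
  · exact LEopt_ominO_right _ (hcand ▸ hle)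

lemma M_desc {strs : List String} {t : String} {k c : Nat}
    (h : M strs t k = some (c + 1)) : ∃ p, p < k ∧ M strs t p = some c := by
  cases k with
  | zero => simp [M] at h
  | succ i =>
      obtain ⟨j, hj1, _, hjk, _, w, hw, hv⟩ := M_extract h
      exact ⟨i + 1 - j, by omega, by rw [hw]; congr 1; omega⟩

lemma M_chain (strs : List String) (t : String) :
    ∀ (d c k : Nat), M strs t k = some (c + d) → ∃ p, p ≤ k ∧ M strs t p = some c := by
  intro d
  induction d with
  | zero => exact fun c k h => ⟨k, le_rfl, h⟩
  | succ d IH =>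
      intro c k h
      have h' : M strs t k = some ((c + d) + 1) := by rw [show (c + d) + 1 = c + (d + 1) from by omega]; exact h
      obtain ⟨p, hpk, hp⟩ := M_desc h'
      obtain ⟨q, hq, hM⟩ := IH c p hp
      exact ⟨q, by omega, hM⟩

/-- the frontier holds exactly the positions whose minimal tiling count is `c`. -/
def GoodF (strs : List String) (t : String) (c : Nat) (F : List Int) : Prop :=
  ∀ x : Int, x ∈ F ↔ ∃ k : Nat, x = (k : Int) ∧ k ≤ t.toList.length ∧ M strs t k = some c

/-- the visited set holds exactly the positions whose minimal tiling count is ≤ `c`. -/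
def GoodV (strs : List String) (t : String) (c : Nat) (V : List Int) : Prop :=
  ∀ x : Int, x ∈ V ↔ ∃ k : Nat, x = (k : Int) ∧ k ≤ t.toList.length ∧
    ∃ d, d ≤ c ∧ M strs t k = some d

/-- invariant of the expansion fold, relative to the visited set `V₀` at level start. -/
def PInv (strs : List String) (t : String) (c : Nat) (V₀ : List Int)
    (st : PySem.Set Int × List Int) : Prop :=
  (∀ x : Int, x ∈ st.1 ↔ x ∈ V₀ ∨ x ∈ st.2) ∧
  (∀ x ∈ st.2, ∃ k : Nat, x = (k : Int) ∧ k ≤ t.toList.length ∧ M strs t k = some (c + 1))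

lemma stepB_inv (strs : List String) (t : String) (c : Nat) (V₀ : List Int)
    (hV₀ : GoodV strs t c V₀) (p : Nat) (hMp : M strs t p = some c)
    (j : Int) (hj1 : 1 ≤ j) (hj5 : j ≤ 5)
    (st : PySem.Set Int × List Int) (h : PInv strs t c V₀ st) :
    PInv strs t c V₀ (stepB strs t (t.toList.length : Int) (p : Int) st j) ∧
    (∀ x ∈ st.2, x ∈ (stepB strs t (t.toList.length : Int) (p : Int) st j).2) ∧
    ((p + j.toNat ≤ t.toList.length ∧ okn strs t p (p + j.toNat) = true ∧
        M strs t (p + j.toNat) = some (c + 1)) →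
      ((p + j.toNat : Nat) : Int) ∈ (stepB strs t (t.toList.length : Int) (p : Int) st j).2) := by
  obtain ⟨jn, rfl⟩ : ∃ jn : Nat, j = (jn : Int) := ⟨j.toNat, (Int.toNat_of_nonneg (by omega)).symm⟩
  have hjn1 : 1 ≤ jn := by exact_mod_cast hj1
  have hjn5 : jn ≤ 5 := by exact_mod_cast hj5
  obtain ⟨hmem, hout⟩ := h
  have hk : ((p : Int) + (jn : Int)) = ((p + jn : Nat) : Int) := by push_cast; ring
  rw [show ((jn : Int)).toNat = jn from Int.toNat_natCast jn]
  simp only [stepB, hk]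
  split_ifs with hc
  · -- the edge is taken: k is appended
    rw [Bool.and_eq_true, Bool.and_eq_true, Bool.not_eq_eq_eq_not, Bool.not_true] at hc
    obtain ⟨⟨hle, hcon⟩, hsl⟩ := hc
    have hleN : p + jn ≤ t.toList.length := by
      have := of_decide_eq_true hle; exact_mod_cast this
    have hnotin : ((p + jn : Nat) : Int) ∉ st.1 := by
      intro hx
      rw [(PySem.Set.contains_iff st.1 _).mpr hx] at hcon
      simp at hcon
    have hnotV : ((p + jn : Nat) : Int) ∉ V₀ := fun hx => hnotin ((hmem _).mpr (Or.inl hx))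
    have hok : okn strs t p (p + jn) = true := hsl
    obtain ⟨d, hd, hMd⟩ := M_edge_le hMp (by omega) (by omega) hok
    have hdc : d = c + 1 := by
      rcases Nat.lt_or_ge c d with h' | h'
      · omega
      · exact absurd ((hV₀ _).mpr ⟨p + jn, rfl, hleN, d, h', hMd⟩) hnotV
    subst hdc
    refine ⟨⟨?_, ?_⟩, ?_, ?_⟩
    · intro x
      rw [PySem.Set.mem_add, hmem x, List.mem_append, List.mem_singleton]
      tauto
    · intro x hx
      rcases List.mem_append.mp hx with hx | hx
      · exact hout x hx
      · exact ⟨p + jn, List.mem_singleton.mp hx, hleN, hMd⟩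
    · intro x hx; exact List.mem_append.mpr (Or.inl hx)
    · intro _; exact List.mem_append.mpr (Or.inr (List.mem_singleton.mpr rfl))
  · -- the edge is not taken: nothing changes, and if the conditions hold k was visited already
    refine ⟨⟨hmem, hout⟩, fun x hx => hx, ?_⟩
    rintro ⟨hleN, hok, hMk⟩
    have hd1 : decide (((p + jn : Nat) : Int) ≤ (t.toList.length : Int)) = true :=
      decide_eq_true (by exact_mod_cast hleN)
    have hsl : strs.contains (PySem.Str.slice t (some (p : Int)) (some ((p + jn : Nat) : Int))) = true := hok
    have hcon : PySem.Set.contains st.1 ((p + jn : Nat) : Int) = true := by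
      rcases Bool.eq_false_or_eq_true (PySem.Set.contains st.1 ((p + jn : Nat) : Int)) with h' | h'
      · exact h'
      · exact absurd (by rw [hd1, h', hsl]; rfl) hc
    have hin : ((p + jn : Nat) : Int) ∈ st.1 := (PySem.Set.contains_iff st.1 _).mp hcon
    rcases (hmem _).mp hin with hV | hL
    · exfalso
      obtain ⟨k', hk', hkN, d, hd, hMd⟩ := (hV₀ _).mp hV
      have hkk : p + jn = k' := by exact_mod_cast hk'
      rw [← hkk, hMk] at hMd
      have : c + 1 = d := by exact Option.some.inj hMd
      omega
    · exact hL

lemma expandB_inv (strs : List String) (t : String) (c : Nat) (V₀ : List Int)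
    (hV₀ : GoodV strs t c V₀) (p : Nat) (hMp : M strs t p = some c)
    (st : PySem.Set Int × List Int) (h : PInv strs t c V₀ st) :
    PInv strs t c V₀ (expandB strs t (t.toList.length : Int) st (p : Int)) ∧
    (∀ x ∈ st.2, x ∈ (expandB strs t (t.toList.length : Int) st (p : Int)).2) ∧
    (∀ jn : Nat, 1 ≤ jn → jn ≤ 5 →
      (p + jn ≤ t.toList.length ∧ okn strs t p (p + jn) = true ∧
        M strs t (p + jn) = some (c + 1)) →
      ((p + jn : Nat) : Int) ∈ (expandB strs t (t.toList.length : Int) st (p : Int)).2) := by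
  unfold expandB
  rw [show PySem.List.pyRange 1 6 1 = [1, 2, 3, 4, 5] from by decide]
  simp only [List.foldl_cons, List.foldl_nil]
  obtain ⟨p1, m1, c1⟩ := stepB_inv strs t c V₀ hV₀ p hMp 1 (by norm_num) (by norm_num) st h
  obtain ⟨p2, m2, c2⟩ := stepB_inv strs t c V₀ hV₀ p hMp 2 (by norm_num) (by norm_num) _ p1
  obtain ⟨p3, m3, c3⟩ := stepB_inv strs t c V₀ hV₀ p hMp 3 (by norm_num) (by norm_num) _ p2
  obtain ⟨p4, m4, c4⟩ := stepB_inv strs t c V₀ hV₀ p hMp 4 (by norm_num) (by norm_num) _ p3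
  obtain ⟨p5, m5, c5⟩ := stepB_inv strs t c V₀ hV₀ p hMp 5 (by norm_num) (by norm_num) _ p4
  refine ⟨p5, fun x hx => m5 _ (m4 _ (m3 _ (m2 _ (m1 _ hx)))), ?_⟩
  intro jn h1 h5 hcond
  interval_cases jn
  · exact m5 _ (m4 _ (m3 _ (m2 _ (c1 hcond))))
  · exact m5 _ (m4 _ (m3 _ (c2 hcond)))
  · exact m5 _ (m4 _ (c3 hcond))
  · exact m5 _ (c4 hcond)
  · exact c5 hcond

lemma outer_fold (strs : List String) (t : String) (c : Nat) (V₀ : List Int)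
    (hV₀ : GoodV strs t c V₀) :
    ∀ (F : List Int),
      (∀ x ∈ F, ∃ p : Nat, x = (p : Int) ∧ p ≤ t.toList.length ∧ M strs t p = some c) →
      ∀ st, PInv strs t c V₀ st →
      PInv strs t c V₀ (F.foldl (expandB strs t (t.toList.length : Int)) st) ∧
      (∀ x ∈ st.2, x ∈ (F.foldl (expandB strs t (t.toList.length : Int)) st).2) ∧
      (∀ p : Nat, (p : Int) ∈ F → ∀ jn : Nat, 1 ≤ jn → jn ≤ 5 →
        (p + jn ≤ t.toList.length ∧ okn strs t p (p + jn) = true ∧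
          M strs t (p + jn) = some (c + 1)) →
        ((p + jn : Nat) : Int) ∈ (F.foldl (expandB strs t (t.toList.length : Int)) st).2) := by
  intro F
  induction F with
  | nil =>
      intro _ st h
      exact ⟨h, fun x hx => hx, fun p hp => absurd hp (List.not_mem_nil)⟩
  | cons i F IH =>
      intro hF st h
      obtain ⟨q, rfl, hqN, hMq⟩ := hF i (List.mem_cons_self ..)
      obtain ⟨e1, e2, e3⟩ := expandB_inv strs t c V₀ hV₀ q hMq st h
      obtain ⟨r1, r2, r3⟩ := IH (fun x hx => hF x (List.mem_cons_of_mem _ hx)) _ e1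
      simp only [List.foldl_cons]
      refine ⟨r1, fun x hx => r2 _ (e2 _ hx), ?_⟩
      intro p hp jn h1 h5 hcond
      rcases List.mem_cons.mp hp with hp | hp
      · have hpq : p = q := by exact_mod_cast hp
        subst hpq
        exact r2 _ (e3 jn h1 h5 hcond)
      · exact r3 p hp jn h1 h5 hcond

lemma expand_inv (strs : List String) (t : String) (c : Nat) (V₀ F : List Int)
    (hV₀ : GoodV strs t c V₀) (hF : GoodF strs t c F) :
    GoodV strs t (c + 1) (F.foldl (expandB strs t (t.toList.length : Int)) (V₀, [])).1 ∧
    GoodF strs t (c + 1) (F.foldl (expandB strs t (t.toList.length : Int)) (V₀, [])).2 := by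
  have h0 : PInv strs t c V₀ ((V₀ : PySem.Set Int), ([] : List Int)) :=
    ⟨fun x => by simp, fun x hx => absurd hx (List.not_mem_nil)⟩
  obtain ⟨⟨q1, q2⟩, _, q3⟩ := outer_fold strs t c V₀ hV₀ F (fun x hx => (hF x).mp hx) _ h0
  have hGF : GoodF strs t (c + 1) (F.foldl (expandB strs t (t.toList.length : Int)) (V₀, [])).2 := by
    intro x
    constructor
    · exact q2 x
    · rintro ⟨k, rfl, hkN, hMk⟩
      cases k with
      | zero =>
          exfalso
          have h0' : M strs t 0 = some 0 := (M_zero_iff strs t 0).mpr rfl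
          rw [h0'] at hMk
          have := Option.some.inj hMk
          omega
      | succ i =>
          obtain ⟨j, hj1, hj5, hjk, hok, w, hw, hv⟩ := M_extract hMk
          rw [show w = c from by omega] at hw
          have hpF : ((i + 1 - j : Nat) : Int) ∈ F := (hF _).mpr ⟨i + 1 - j, rfl, by omega, hw⟩
          have hres := q3 (i + 1 - j) hpF j hj1 hj5
            ⟨by omega, by rw [show i + 1 - j + j = i + 1 from by omega]; exact hok,
             by rw [show i + 1 - j + j = i + 1 from by omega]; exact hMk⟩
          rwa [show i + 1 - j + j = i + 1 from by omega] at hres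
  refine ⟨?_, hGF⟩
  intro x
  rw [q1 x]
  constructor
  · rintro (hx | hx)
    · obtain ⟨k, rfl, hkN, d, hd, hMd⟩ := (hV₀ x).mp hx
      exact ⟨k, rfl, hkN, d, by omega, hMd⟩
    · obtain ⟨k, rfl, hkN, hMk⟩ := q2 x hx
      exact ⟨k, rfl, hkN, c + 1, le_rfl, hMk⟩
  · rintro ⟨k, rfl, hkN, d, hd, hMd⟩
    rcases Nat.lt_or_ge d (c + 1) with hdc | hdc
    · exact Or.inl ((hV₀ _).mpr ⟨k, rfl, hkN, d, by omega, hMd⟩)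
    · refine Or.inr ((hGF _).mpr ⟨k, rfl, hkN, ?_⟩)
      rw [hMd]
      congr 1
      omega

lemma bfs_loop (strs : List String) (t : String) :
    ∀ (fuel c : Nat) (F V : List Int),
      GoodF strs t c F → GoodV strs t c V →
      t.toList.length + 2 ≤ fuel + c →
      (∀ d : Nat, d < c → M strs t t.toList.length ≠ some d) →
      bfsB strs t (t.toList.length : Int) fuel F V (c : Int) =
        enc (M strs t t.toList.length) := by
  intro fuel
  induction fuel with
  | zero =>
      intro c F V hF hV hfc hnot
      cases hM : M strs t t.toList.length with
      | none => simp [bfsB, enc]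
      | some m =>
          exfalso
          have hm := M_le strs t _ m hM
          have : ¬ m < c := fun h' => hnot m h' hM
          omega
  | succ fuel IH =>
      intro c F V hF hV hfc hnot
      by_cases hFnil : F = []
      · subst hFnil
        rw [show bfsB strs t (t.toList.length : Int) (fuel + 1) [] V (c : Int) = -1 from by
          simp [bfsB]]
        cases hM : M strs t t.toList.length with
        | none => rfl
        | some m =>
            exfalso
            have hmc : c ≤ m := by
              rcases Nat.lt_or_ge m c with h' | h'
              · exact absurd hM (hnot m h')
              · exact h'
            obtain ⟨p, hpN, hMp⟩ := M_chain strs t (m - c) c t.toList.length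
              (by rw [hM]; congr 1; omega)
            exact absurd ((hF _).mpr ⟨p, rfl, by omega, hMp⟩) (List.not_mem_nil)
      · by_cases hcont : F.contains ((t.toList.length : Int)) = true
        · have hNin : ((t.toList.length : Nat) : Int) ∈ F := List.contains_iff_mem.mp hcont
          obtain ⟨k, hk, hkN, hMk⟩ := (hF _).mp hNin
          have hkN' : t.toList.length = k := by exact_mod_cast hk
          subst hkN'
          rw [hMk]
          simp only [bfsB]
          rw [if_neg hFnil, if_pos hcont]
          rfl
        · rw [Bool.not_eq_true] at hcont
          have hMne : M strs t t.toList.length ≠ some c := by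
            intro hM
            have hmem := List.contains_iff_mem.mpr
              ((hF _).mpr ⟨t.toList.length, rfl, le_rfl, hM⟩)
            rw [hcont] at hmem
            exact absurd hmem (by simp)
          obtain ⟨gV, gF⟩ := expand_inv strs t c V F hV hF
          have hrec := IH (c + 1) _ _ gF gV (by omega) (by
            intro d hd hM
            rcases Nat.lt_or_ge d c with h' | h'
            · exact hnot d h' hM
            · exact hMne (by rw [← show d = c from by omega]; exact hM))
          have hniF : ((t.length : Int)) ∉ F := by
            intro hx
            rw [← List.contains_iff_mem,
                show (t.length : Int) = (t.toList.length : Int) from by simp, hcont] at hx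
            exact absurd hx (by simp)
          simp only [bfsB]
          rw [if_neg hFnil, if_neg (by simpa using hniF)]
          rw [show ((c : Int) + 1) = ((c + 1 : Nat) : Int) from by push_cast; ring]
          exact hrec

lemma solution_alt_eq (strs : List String) (t : String) :
    solution_alt strs t = enc (M strs t t.toList.length) := by
  simp only [solution_alt, PySem.Str.len_eq, Int.toNat_natCast]
  have h0 : ((0 : Nat) : Int) = (0 : Int) := rfl
  rw [← h0]
  apply bfs_loop strs t (t.toList.length + 2) 0 [0] (PySem.Set.ofList [0])
  · intro x
    constructor
    · intro hx
      simp only [List.mem_singleton] at hx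
      exact ⟨0, hx, by omega, (M_zero_iff strs t 0).mpr rfl⟩
    · rintro ⟨k, rfl, -, hM⟩
      rw [(M_zero_iff strs t k).mp hM]
      simp
  · intro x
    constructor
    · intro hx
      have : x = 0 := by
        have : PySem.Set.ofList ([0] : List Int) = [0] := by decide
        rw [this] at hx
        simpa using hx
      exact ⟨0, this, by omega, 0, le_rfl, (M_zero_iff strs t 0).mpr rfl⟩
    · rintro ⟨k, rfl, -, d, hd, hM⟩
      have hd0 : d = 0 := by omega
      subst hd0
      rw [(M_zero_iff strs t k).mp hM]
      decide
  · omega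
  · intro d hd; omega

-- ===== VERDICT (by name: the statement is the Claim_ definition above) =====
theorem solution_spec : Claim_equal_solution := by
  unfold Claim_equal_solution Spec_solution
  intro strs t _
  rw [solution_eq, solution_alt_eq]
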